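-- pv_equiv track=rewrite | github.com/datawhalechina/huawei-od-python | codes/questions200/046_increment-string.py | solve_method
-- ===== SOURCE A (Python) =====
-- def solve_method(chars):
--     total_A = chars.count("A")
--     res = total_A
--     count_A = 0
--     for i in range(len(chars)):
--         if chars[i] == "A":
--             count_A += 1
--         # 将区间[0, i]全部转成A的修改次数
--         count_before_i = i + 1 - count_A
--         # 将区间[i+1, len(chars)]全部转为B的修改次数
--         count_after_i = total_A - count_A
--         # 计算最小值
--         res = min(res, count_before_i + count_after_i)
--     return res
-- ===== SOURCE B (Python) =====
-- def solve_method(chars):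
--     # Two-state DP, one pass: f = cost while still in the all-A prefix,
--     # g = cost once we've switched to the (non-A) suffix region.
--     f = 0
--     g = 0
--     for c in chars:
--         g = min(f, g) + (1 if c == "A" else 0)
--         f = f + (0 if c == "A" else 1)
--     return min(f, g)
-- ===== Notes on version B (the rewrite author's own statement) =====
-- stated objective: alternative
-- what changed: Replaces A's precomputed total-A count plus per-index prefix bookkeeping with a one-pass two-state DP (cost-in-prefix f, cost-in-suffix g) carried through the scan.
import Mathlib
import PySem

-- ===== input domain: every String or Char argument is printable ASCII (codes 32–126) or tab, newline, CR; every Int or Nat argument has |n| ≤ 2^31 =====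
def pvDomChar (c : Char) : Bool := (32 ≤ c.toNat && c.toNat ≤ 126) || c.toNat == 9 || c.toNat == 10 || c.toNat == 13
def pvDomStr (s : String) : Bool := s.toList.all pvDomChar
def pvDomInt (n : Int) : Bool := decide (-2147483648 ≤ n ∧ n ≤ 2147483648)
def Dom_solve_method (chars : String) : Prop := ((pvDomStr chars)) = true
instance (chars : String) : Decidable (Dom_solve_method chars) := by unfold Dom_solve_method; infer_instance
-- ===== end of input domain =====

-- B replaces A's total-count + prefix-count scan by a one-pass two-state DP; objective: alternative decomposition (same cost).

-- ===== PORT A =====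
def solve_method (chars : String) : Int :=
  let total_A : Int := (PySem.Str.count chars "A" : Int)
  ((PySem.List.pyRange 0 (PySem.Str.len chars) 1).foldl
      (fun (st : Int × Int) (i : Int) =>
        let count_A : Int := if PySem.List.pyGetD chars.toList i ' ' = 'A' then st.2 + 1 else st.2
        let count_before_i : Int := i + 1 - count_A
        let count_after_i : Int := total_A - count_A
        (min st.1 (count_before_i + count_after_i), count_A))
      (total_A, 0)).1

-- ===== PORT B =====
def solve_method_alt (chars : String) : Int :=
  let fg := chars.toList.foldl
      (fun (fg : Int × Int) (c : Char) =>
        (fg.1 + (if c = 'A' then 0 else 1), min fg.1 fg.2 + (if c = 'A' then 1 else 0)))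
      (0, 0)
  min fg.1 fg.2

-- ===== PRECONDITION & SPEC =====
def Spec_solve_method (chars : String) (out : Int) : Prop := out = solve_method_alt chars
instance (chars : String) (out : Int) : Decidable (Spec_solve_method chars out) := by unfold Spec_solve_method; infer_instance

-- ===== CLAIM (what is proved, stated in full; the proofs are below) =====
def Claim_equal_solve_method : Prop := ∀ (chars : String), Dom_solve_method chars → Spec_solve_method chars (solve_method chars)

-- ===== LEMMAS AND PROOFS =====

/-- Count of 'A' in a list, as an `Int`. -/
def pvCntA (l : List Char) : Int := (l.count 'A' : Int)

/-- Minimal number of edits to turn `l` into A…A B…B (non-'A' treated as B-side). -/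
def pvBest : List Char → Int
  | [] => 0
  | c :: t => min (pvCntA (c :: t)) ((if c = 'A' then 0 else 1) + pvBest t)

lemma pvCntA_cons (c : Char) (t : List Char) :
    pvCntA (c :: t) = (if c = 'A' then 1 else 0) + pvCntA t := by
  by_cases hc : c = 'A' <;> simp [pvCntA, hc]
  ring

lemma pvBest_le (l : List Char) : pvBest l ≤ pvCntA l := by
  cases l with
  | nil => simp [pvBest, pvCntA]
  | cons c t => simp [pvBest]

lemma go_singleton (c : Char) :
    ∀ (fuel : Nat) (l : List Char) (acc : Nat), l.length ≤ fuel →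
      PySem.Chars.count.go [c] fuel l acc = acc + l.count c := by
  intro fuel
  induction fuel with
  | zero =>
    intro l acc h
    have : l = [] := List.length_eq_zero_iff.mp (Nat.le_zero.mp h)
    subst this; simp [PySem.Chars.count.go]
  | succ n ih =>
    intro l acc h
    cases l with
    | nil => simp [PySem.Chars.count.go]
    | cons d t =>
      have hle : t.length ≤ n := by simp at h; omega
      simp only [PySem.Chars.count.go]
      by_cases hd : c = d
      · subst hd
        have hp : List.isPrefixOf [c] (c :: t) = true := by
          simp [List.isPrefixOf]
        simp only [hp, if_true, List.length_cons, List.length_nil, List.drop_succ_cons,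
          List.drop_zero]
        rw [ih t (acc + 1) hle]
        simp
        omega
      · have hp : List.isPrefixOf [c] (d :: t) = false := by
          simp [List.isPrefixOf, hd]
        simp only [hp, Bool.false_eq_true, if_false]
        rw [ih t acc hle]
        simp [Ne.symm hd]

lemma strcount_A (s : String) : (PySem.Str.count s "A" : Int) = pvCntA s.toList := by
  have h : PySem.Str.count s "A" = PySem.Chars.count s.toList ['A'] := by
    simp [PySem.Str.count]
  rw [h]
  unfold PySem.Chars.count
  simp only [List.isEmpty, pvCntA]
  rw [go_singleton 'A' s.toList.length s.toList 0 le_rfl]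
  simp

lemma B_loop (l : List Char) : ∀ f g : Int,
    (min (l.foldl
        (fun (fg : Int × Int) (c : Char) =>
          (fg.1 + (if c = 'A' then 0 else 1), min fg.1 fg.2 + (if c = 'A' then 1 else 0)))
        (f, g)).1
      (l.foldl
        (fun (fg : Int × Int) (c : Char) =>
          (fg.1 + (if c = 'A' then 0 else 1), min fg.1 fg.2 + (if c = 'A' then 1 else 0)))
        (f, g)).2)
    = min (g + pvCntA l) (f + pvBest l) := by
  induction l with
  | nil => intro f g; simp [pvCntA, pvBest, min_comm]
  | cons c t ih =>
    intro f g
    simp only [List.foldl_cons]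
    rw [ih]
    rw [pvCntA_cons]
    simp only [pvBest]
    rw [pvCntA_cons]
    by_cases hc : c = 'A' <;> simp [hc] <;> omega

lemma A_loop (t : Int) :
  ∀ (l : List Char) (c : Char) (s cAcc res : Int),
    t - (cAcc + (if c = 'A' then 1 else 0)) = pvCntA l →
    ((PySem.List.enumerate (c :: l) s).foldl
        (fun (st : Int × Int) (p : Int × Char) =>
          (min st.1
              ((p.1 + 1 - if p.2 = 'A' then st.2 + 1 else st.2) +
                (t - if p.2 = 'A' then st.2 + 1 else st.2)),
            if p.2 = 'A' then st.2 + 1 else st.2))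
        (res, cAcc)).1
    = min res ((s - cAcc) + ((if c = 'A' then 0 else 1) + pvBest l)) := by
  intro l
  induction l with
  | nil =>
    intro c s cAcc res h
    simp only [PySem.List.enumerate_cons, PySem.List.enumerate_nil, List.foldl_cons,
      List.foldl_nil]
    simp only [pvCntA, List.count_nil, Nat.cast_zero] at h
    by_cases hc : c = 'A' <;> simp [hc, pvBest] at h ⊢ <;> omega
  | cons d u ih =>
    intro c s cAcc res h
    rw [PySem.List.enumerate_cons, List.foldl_cons]
    have h' : t - ((if c = 'A' then cAcc + 1 else cAcc) + (if d = 'A' then 1 else 0))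
        = pvCntA u := by
      rw [pvCntA_cons] at h
      by_cases hc : c = 'A' <;> by_cases hd : d = 'A' <;> simp [hc, hd] at h ⊢ <;> omega
    have := ih d (s + 1) (if c = 'A' then cAcc + 1 else cAcc)
      (min res ((s + 1 - if c = 'A' then cAcc + 1 else cAcc) +
        (t - if c = 'A' then cAcc + 1 else cAcc))) h'
    simp only at this ⊢
    rw [this]
    rw [pvCntA_cons] at h
    simp only [pvBest]
    rw [pvCntA_cons]
    by_cases hc : c = 'A' <;> by_cases hd : d = 'A' <;> simp [hc, hd] at h ⊢ <;> omega

lemma main_eq (chars : String) : solve_method chars = solve_method_alt chars := by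
  simp only [solve_method, solve_method_alt, strcount_A]
  have hlen : PySem.Str.len chars = ((chars.toList.length : Nat) : Int) := by
    simp [PySem.Str.len]
  rw [hlen]
  have hfold :
      (PySem.List.pyRange 0 (chars.toList.length : Int) 1).foldl
        (fun (st : Int × Int) (i : Int) =>
          (min st.1
              ((i + 1 - if PySem.List.pyGetD chars.toList i ' ' = 'A' then st.2 + 1 else st.2) +
                (pvCntA chars.toList -
                  if PySem.List.pyGetD chars.toList i ' ' = 'A' then st.2 + 1 else st.2)),
            if PySem.List.pyGetD chars.toList i ' ' = 'A' then st.2 + 1 else st.2))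
        (pvCntA chars.toList, 0)
      = (PySem.List.enumerate chars.toList 0).foldl
        (fun (st : Int × Int) (p : Int × Char) =>
          (min st.1
              ((p.1 + 1 - if p.2 = 'A' then st.2 + 1 else st.2) +
                (pvCntA chars.toList - if p.2 = 'A' then st.2 + 1 else st.2)),
            if p.2 = 'A' then st.2 + 1 else st.2))
        (pvCntA chars.toList, 0) := by
    rw [PySem.List.enumerate_eq_map_pyRange (d := ' '), List.foldl_map]
    simp [PySem.List.len_eq]
  rw [hfold, B_loop]
  cases hl : chars.toList with
  | nil => simp [pvCntA, pvBest]
  | cons c tl =>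
    rw [A_loop (pvCntA (c :: tl)) tl c 0 0 (pvCntA (c :: tl)) (by rw [pvCntA_cons]; omega)]
    have hbest : min (pvCntA (c :: tl)) ((if c = 'A' then 0 else 1) + pvBest tl)
        = pvBest (c :: tl) := rfl
    simp only [zero_add, sub_zero]
    rw [hbest]
    have hle := pvBest_le (c :: tl)
    omega

-- ===== VERDICT (by name: the statement is the Claim_ definition above) =====
theorem solve_method_spec : Claim_equal_solve_method := by
  intro chars _
  unfold Spec_solve_method
  exact main_eq chars
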